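-- pv_equiv track=rewrite | github.com/tuxisawesome/DaoDownloader | system/apps/lib-default-packagekit.py | remove_trailing_filename
-- ===== SOURCE A (Python) =====
-- def remove_trailing_filename(path=""):
--     x = path.split("/")
--     x.pop()
--     if x == []:
--         return path
--     y = ""
--     for thing in x:
--         y = y + thing + "/"
--     return y
-- ===== SOURCE B (Python) =====
-- def remove_trailing_filename(path=""):
--     # right-partition at the LAST slash; no segment list, no rejoin loop
--     before, sep, _after = path.rpartition("/")
--     return before + sep if sep else path
-- ===== Notes on version B (the rewrite author's own statement) =====
-- stated objective: simpler
-- what changed: Replaces split-into-all-segments, pop, and a rejoin loop by a single right-partition at the last slash (keep the prefix up to and including it; no slash, return the path unchanged).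
import Mathlib
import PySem

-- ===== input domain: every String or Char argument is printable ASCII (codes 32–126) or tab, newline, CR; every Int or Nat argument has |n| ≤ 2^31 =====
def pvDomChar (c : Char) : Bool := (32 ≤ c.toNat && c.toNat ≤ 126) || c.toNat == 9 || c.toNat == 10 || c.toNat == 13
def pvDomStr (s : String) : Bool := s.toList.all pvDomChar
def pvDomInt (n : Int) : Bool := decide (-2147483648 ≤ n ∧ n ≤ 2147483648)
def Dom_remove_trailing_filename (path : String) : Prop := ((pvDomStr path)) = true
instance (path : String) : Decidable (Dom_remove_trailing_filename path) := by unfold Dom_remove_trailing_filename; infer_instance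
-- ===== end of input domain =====

-- B replaces A's split/pop/rejoin-loop by a single right-partition at the last slash (simpler; same cost).

-- ===== PORT A =====
-- x = path.split("/"); x.pop(); if x == []: return path; y = ""; for thing in x: y = y + thing + "/"; return y
-- (ported over code points; x.pop() on the never-empty split result removes the last element = dropLast)
def remove_trailing_filename (path : String) : String :=
  let x := PySem.Chars.splitOn path.toList "/".toList
  let x := x.dropLast
  if x = [] then path
  else String.mk (x.foldl (fun y thing => y ++ thing ++ ['/']) [])

-- ===== PORT B =====
-- before, sep, _after = path.rpartition("/"); return before + sep if sep else path
-- (hand port of rpartition for the 1-char separator "/", exact: scan from the right for the last '/';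
--  if none exists sep = "" and the path is returned, else before+sep = the prefix up to and incl. that '/')
def remove_trailing_filename_alt (path : String) : String :=
  match path.toList.reverse.dropWhile (fun c => c ≠ '/') with
  | [] => path
  | l  => String.mk l.reverse

-- ===== PRECONDITION & SPEC =====
def Spec_remove_trailing_filename (path : String) (out : String) : Prop := out = remove_trailing_filename_alt path
instance (path : String) (out : String) : Decidable (Spec_remove_trailing_filename path out) := by unfold Spec_remove_trailing_filename; infer_instance

-- ===== CLAIM (what is proved, stated in full; the proofs are below) =====
def Claim_equal_remove_trailing_filename : Prop := ∀ (path : String), Dom_remove_trailing_filename path → Spec_remove_trailing_filename path (remove_trailing_filename path)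

-- ===== LEMMAS AND PROOFS =====

-- reference single-char split on '/'
def pvSpl : List Char → List (List Char)
  | [] => [[]]
  | c :: rest => if c = '/' then [] :: pvSpl rest else (pvSpl rest).modifyHead (c :: ·)

theorem pvSpl_ne_nil (cs : List Char) : pvSpl cs ≠ [] := by
  cases cs with
  | nil => simp [pvSpl]
  | cons c rest =>
    simp only [pvSpl]
    split_ifs
    · simp
    · cases h : pvSpl rest with
      | nil => exact absurd h (pvSpl_ne_nil rest)
      | cons p ps => simp [h, List.modifyHead]

theorem pv_go_eq (l : List Char) : ∀ (fuel : Nat) (cur : List Char) (acc : List (List Char)),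
    l.length < fuel →
    PySem.Chars.splitOn.go ['/'] fuel l cur acc = acc.reverse ++ (pvSpl l).modifyHead (cur.reverse ++ ·) := by
  induction l with
  | nil =>
    intro fuel cur acc hf
    cases fuel with
    | zero => omega
    | succ f => simp [PySem.Chars.splitOn.go, pvSpl, List.modifyHead]
  | cons c rest ih =>
    intro fuel cur acc hf
    cases fuel with
    | zero => simp at hf
    | succ f =>
      rw [PySem.Chars.splitOn.go]
      by_cases hc : c = '/'
      · have hpre : List.isPrefixOf ['/'] (c :: rest) = true := by
          subst hc; simp [List.isPrefixOf]
        simp only [hpre, if_pos]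
        have := ih f [] (cur.reverse :: acc) (by simpa using Nat.lt_of_succ_lt_succ hf)
        simp only [List.length_cons, List.drop_succ_cons, List.length_nil, List.drop_zero] at this ⊢
        rw [this]
        cases h : pvSpl rest with
        | nil => exact absurd h (pvSpl_ne_nil rest)
        | cons p ps => simp [pvSpl, hc, h, List.modifyHead]
      · have hpre : List.isPrefixOf ['/'] (c :: rest) = false := by
          simp [List.isPrefixOf, BEq.beq]
          intro h; exact absurd h.symm hc
        simp only [hpre, Bool.false_eq_true, if_false]
        rw [ih f (c :: cur) acc (Nat.lt_of_succ_lt_succ hf)]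
        cases h : pvSpl rest with
        | nil => exact absurd h (pvSpl_ne_nil rest)
        | cons p ps => simp [pvSpl, hc, h, List.modifyHead]

theorem pv_splitOn_eq (cs : List Char) : PySem.Chars.splitOn cs ['/'] = pvSpl cs := by
  rw [PySem.Chars.splitOn, pv_go_eq cs (cs.length + 1) [] [] (Nat.lt_succ_self _)]
  cases h : pvSpl cs with
  | nil => exact absurd h (pvSpl_ne_nil cs)
  | cons p ps => simp [List.modifyHead]

theorem pvSpl_of_not_mem (cs : List Char) (h : '/' ∉ cs) : pvSpl cs = [cs] := by
  induction cs with
  | nil => rfl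
  | cons c rest ih =>
    have hc : c ≠ '/' := fun hh => h (hh ▸ List.mem_cons_self ..)
    have hr : '/' ∉ rest := fun hh => h (List.mem_cons_of_mem _ hh)
    simp [pvSpl, hc, ih hr, List.modifyHead]

theorem pvSpl_dropLast_ne_nil (cs : List Char) (h : '/' ∈ cs) : (pvSpl cs).dropLast ≠ [] := by
  induction cs with
  | nil => simp at h
  | cons c rest ih =>
    by_cases hc : c = '/'
    · simp only [pvSpl, hc, if_pos rfl]
      cases hr : pvSpl rest with
      | nil => exact absurd hr (pvSpl_ne_nil rest)
      | cons p ps => simp [hr]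
    · have hr : '/' ∈ rest := by
        rcases List.mem_cons.mp h with h1 | h1
        · exact absurd h1.symm hc
        · exact h1
      have := ih hr
      simp only [pvSpl, hc, if_neg hc]
      cases hsp : pvSpl rest with
      | nil => exact absurd hsp (pvSpl_ne_nil rest)
      | cons p ps =>
        rw [hsp] at this
        cases ps with
        | nil => simp at this
        | cons q qs => simp [List.modifyHead]

theorem pv_foldl_join (xs : List (List Char)) : ∀ (y : List Char),
    xs.foldl (fun y thing => y ++ thing ++ ['/']) y = y ++ xs.flatMap (fun t => t ++ ['/']) := by
  induction xs with
  | nil => intro y; simp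
  | cons t ts ih => intro y; simp [List.foldl_cons, ih, List.flatMap_cons, List.flatMap_def]

theorem pv_main (cs : List Char) (h : '/' ∈ cs) :
    (pvSpl cs).dropLast.flatMap (fun t => t ++ ['/'])
      = (cs.reverse.dropWhile (fun c => c ≠ '/')).reverse := by
  induction cs with
  | nil => simp at h
  | cons c rest ih =>
    by_cases hr : '/' ∈ rest
    · -- the last slash is inside rest: result = c :: (answer for rest)
      have hdw : rest.reverse.dropWhile (fun x => x ≠ '/') ≠ [] := by
        intro hnil
        have := List.dropWhile_eq_nil_iff.mp hnil '/' (by simpa using hr)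
        simp at this
      have hright : ((c :: rest).reverse.dropWhile (fun x => x ≠ '/')).reverse
          = c :: (rest.reverse.dropWhile (fun x => x ≠ '/')).reverse := by
        rw [List.reverse_cons, List.dropWhile_append]
        simp only [List.isEmpty_iff]
        rw [if_neg hdw]
        simp
      rw [hright, ← ih hr]
      have hd := pvSpl_dropLast_ne_nil rest hr
      by_cases hc : c = '/'
      · simp only [pvSpl, hc, if_pos rfl]
        cases hsp : pvSpl rest with
        | nil => exact absurd hsp (pvSpl_ne_nil rest)
        | cons p ps =>
          rw [hsp] at hd
          cases ps with
          | nil => simp at hd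
          | cons q qs => simp [hc]
      · simp only [pvSpl, if_neg hc]
        cases hsp : pvSpl rest with
        | nil => exact absurd hsp (pvSpl_ne_nil rest)
        | cons p ps =>
          rw [hsp] at hd
          cases ps with
          | nil => simp at hd
          | cons q qs => simp [List.modifyHead]
    · -- no slash in rest, so c = '/': answer is ['/']
      have hc : c = '/' := by
        rcases List.mem_cons.mp h with h1 | h1
        · exact h1.symm
        · exact absurd h1 hr
      have hall : rest.reverse.dropWhile (fun x => x ≠ '/') = [] := by
        apply List.dropWhile_eq_nil_iff.mpr
        intro x hx
        simp only [ne_eq, decide_eq_true_eq]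
        intro hxe; subst hxe; exact hr (by simpa using hx)
      have hright : (c :: rest).reverse.dropWhile (fun x => x ≠ '/') = [c] := by
        rw [List.reverse_cons, List.dropWhile_append, hall]
        simp [hc]
      rw [hright]
      simp only [pvSpl, hc, if_pos rfl, pvSpl_of_not_mem rest hr]
      simp

theorem pv_slash_toList : "/".toList = ['/'] := by decide

-- ===== VERDICT (by name: the statement is the Claim_ definition above) =====
theorem remove_trailing_filename_spec : Claim_equal_remove_trailing_filename := by
  intro path _
  unfold Spec_remove_trailing_filename remove_trailing_filename remove_trailing_filename_alt
  simp only [pv_slash_toList, pv_splitOn_eq]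
  by_cases h : '/' ∈ path.toList
  · have hne := pvSpl_dropLast_ne_nil path.toList h
    rw [if_neg hne, pv_foldl_join, List.nil_append, pv_main path.toList h]
    have hdw : path.toList.reverse.dropWhile (fun c => c ≠ '/') ≠ [] := by
      intro hnil
      have := List.dropWhile_eq_nil_iff.mp hnil '/' (by simpa using h)
      simp at this
    cases hm : path.toList.reverse.dropWhile (fun c => c ≠ '/') with
    | nil => exact absurd hm hdw
    | cons a l => rfl
  · have h1 : (pvSpl path.toList).dropLast = [] := by
      rw [pvSpl_of_not_mem path.toList h]; rfl
    rw [if_pos h1]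
    have hall : path.toList.reverse.dropWhile (fun c => c ≠ '/') = [] := by
      apply List.dropWhile_eq_nil_iff.mpr
      intro x hx
      simp only [ne_eq, decide_eq_true_eq]
      intro hxe; subst hxe; exact h (by simpa using hx)
    rw [hall]
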